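-- pv_equiv track=rewrite | github.com/yhyeil/Algorithms_py | sorting/sorting.py | can_sort
-- ===== SOURCE A (Python) =====
-- def can_sort(n, arr):
--     # Separate the numbers at even and odd indices
--     even_indices = [arr[i] for i in range(0, n, 2)]
--     odd_indices = [arr[i] for i in range(1, n, 2)]
--
--     # Sort them
--     even_indices.sort()
--     odd_indices.sort()
--
--     # Combine the two sorted lists
--     merged = [0] * n
--     merged[::2] = even_indices
--     merged[1::2] = odd_indices
--
--     # Check if the combined list is sorted
--     return merged == sorted(arr)
-- ===== SOURCE B (Python) =====
-- def _counts(xs):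
--     c = {}
--     for x in xs:
--         c[x] = c.get(x, 0) + 1
--     return c
--
--
-- def can_sort(n, arr):
--     # The parity-preserving rearrangement can be globally sorted exactly when the
--     # multiset of even-index elements equals the multiset at even positions of the
--     # sorted array, and likewise for odd indices.
--     s = sorted(arr)
--     return _counts(arr[:n:2]) == _counts(s[::2]) and _counts(arr[1:n:2]) == _counts(s[1::2])
-- ===== Notes on version B (the rewrite author's own statement) =====
-- stated objective: alternative
-- what changed: B never sorts the two halves and never interleaves: it sorts arr once and checks that the multiset of even-index elements (counted with a dict) equals the multiset at even positions of the sorted array, and likewise for odd indices; A instead sorts both halves, rebuilds the interleaving via extended-slice assignment and compares it with sorted(arr). Pre_ excludes exactly the inputs where A raises IndexError (some index in range(n) is out of range).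
import Mathlib
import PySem

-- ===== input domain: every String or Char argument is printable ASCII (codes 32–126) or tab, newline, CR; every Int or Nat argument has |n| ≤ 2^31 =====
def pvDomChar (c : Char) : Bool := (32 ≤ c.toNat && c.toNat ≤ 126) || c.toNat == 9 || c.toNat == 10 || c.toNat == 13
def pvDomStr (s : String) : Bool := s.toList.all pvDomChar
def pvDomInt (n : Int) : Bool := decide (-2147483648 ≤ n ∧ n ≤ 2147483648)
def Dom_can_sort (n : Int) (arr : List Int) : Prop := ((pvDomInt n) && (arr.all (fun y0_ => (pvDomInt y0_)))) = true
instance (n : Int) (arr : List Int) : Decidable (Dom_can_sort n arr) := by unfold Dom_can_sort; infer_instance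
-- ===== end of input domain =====

-- B replaces A's "sort both halves, interleave, compare with sorted(arr)" by a single sort
-- plus a multiset comparison of parity classes via counting dicts — a different algorithm.


-- ===== PORT A =====
-- Hand-ported helpers for Python's stride-2 slicing / extended-slice assignment
-- `lst[a::2] = vals` (no PySem primitive): the assignment keeps the complementary
-- stride of the target and places the new values at the assigned slots; `riffle
-- vals kept` interleaves them starting with `vals`. Exact when len(vals) equals the
-- number of assigned slots, which Python's extended-slice assignment demands
-- (else it raises ValueError).
def riffle (e o : List Int) : List Int :=
  match e, o with
  | [], o => o
  | x :: xs, o => x :: riffle o xs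
termination_by e.length + o.length
decreasing_by simp; omega

-- `stride2 xs` = xs[::2] (every second element); also used by port B for its slices
def stride2 : List Int → List Int
  | [] => []
  | [x] => [x]
  | x :: _ :: t => x :: stride2 t

def can_sort (n : Int) (arr : List Int) : Bool :=
  let even_indices := (PySem.List.pyRange 0 n 2).map (fun i => PySem.List.pyGetD arr i 0)
  let odd_indices := (PySem.List.pyRange 1 n 2).map (fun i => PySem.List.pyGetD arr i 0)
  let even_sorted := PySem.List.sorted even_indices (fun x => x) false
  let odd_sorted := PySem.List.sorted odd_indices (fun x => x) false
  let merged0 := List.replicate n.toNat (0 : Int)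
  let merged1 := riffle even_sorted (stride2 (merged0.drop 1))  -- merged[::2] = even_indices
  let merged2 := riffle (stride2 merged1) odd_sorted            -- merged[1::2] = odd_indices
  decide (merged2 = PySem.List.sorted arr (fun x => x) false)

-- ===== PORT B =====
-- `_counts`: the counting-dict loop of Source B
def pvCounts (xs : List Int) : PySem.Dict Int Int :=
  xs.foldl (fun c x => c.insert x (PySem.Dict.getD c x 0 + 1)) PySem.Dict.empty

-- Python `d1 == d2` on dicts: mapping equality, insertion order ignored (hand port, exact)
def pvDictEq (d1 d2 : PySem.Dict Int Int) : Bool :=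
  d1.items.all (fun p => d2.get? p.1 == some p.2) &&
  d2.items.all (fun p => d1.get? p.1 == some p.2)

def can_sort_alt (n : Int) (arr : List Int) : Bool :=
  let s := PySem.List.sorted arr (fun x => x) false
  -- arr[:n:2] and arr[1:n:2]: stride-2 slices ported by hand (stop normalized as Python does; exact)
  let stop := (if n < 0 then (arr.length : Int) + n else n).toNat
  pvDictEq (pvCounts (stride2 (arr.take stop))) (pvCounts (stride2 s)) &&
  pvDictEq (pvCounts (stride2 ((arr.take stop).drop 1))) (pvCounts (stride2 (s.drop 1)))

-- ===== PRECONDITION & SPEC =====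
-- Pre_ excludes exactly the inputs where A raises IndexError (some i < n is ≥ len(arr)).
def Pre_can_sort (n : Int) (arr : List Int) : Prop := n ≤ (arr.length : Int)
instance (n : Int) (arr : List Int) : Decidable (Pre_can_sort n arr) := by unfold Pre_can_sort; infer_instance
def pvWitness_can_sort : Int × List Int := (3, [2, 1, 3])

def Spec_can_sort (n : Int) (arr : List Int) (out : Bool) : Prop := out = can_sort_alt n arr
instance (n : Int) (arr : List Int) (out : Bool) : Decidable (Spec_can_sort n arr out) := by unfold Spec_can_sort; infer_instance

-- ===== CLAIM (what is proved, stated in full; the proofs are below) =====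
def Claim_equal_can_sort : Prop := ∀ (n : Int) (arr : List Int), Dom_can_sort n arr → Pre_can_sort n arr → Spec_can_sort n arr (can_sort n arr)

-- ===== LEMMAS AND PROOFS =====

theorem riffle_length (e o : List Int) : (riffle e o).length = e.length + o.length := by
  fun_induction riffle e o with
  | case1 o => simp
  | case2 x xs o ih => simp [ih]; omega

theorem stride2_cons (a : Int) (l : List Int) : stride2 (a :: l) = a :: stride2 (l.drop 1) := by
  cases l <;> simp [stride2]

theorem stride2_length (xs : List Int) : (stride2 xs).length = (xs.length + 1) / 2 := by
  fun_induction stride2 xs with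
  | case1 => simp
  | case2 x => simp
  | case3 x y t ih => simp [ih]; omega

theorem stride2_getElem? (xs : List Int) (i : Nat) : (stride2 xs)[i]? = xs[2 * i]? := by
  induction xs using stride2.induct generalizing i with
  | case1 => simp [stride2]
  | case2 x =>
      cases i with
      | zero => simp [stride2]
      | succ m =>
          rw [show 2 * (m + 1) = 2 * m + 1 + 1 by ring]
          simp [stride2]
  | case3 x y t ih =>
      cases i with
      | zero => simp [stride2]
      | succ m =>
          rw [show 2 * (m + 1) = 2 * m + 1 + 1 by ring]
          simp [stride2, ih]

theorem stride2_riffle (e o : List Int) (h1 : o.length ≤ e.length) (h2 : e.length ≤ o.length + 1) :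
    stride2 (riffle e o) = e := by
  induction e generalizing o with
  | nil =>
      have ho : o = [] := by
        cases o with
        | nil => rfl
        | cons b o' => simp at h1
      subst ho; simp [riffle, stride2]
  | cons x xs ih =>
      cases o with
      | nil =>
          have hxs : xs = [] := by
            cases xs with
            | nil => rfl
            | cons a t => simp at h2
          subst hxs; simp [riffle, stride2]
      | cons b o' =>
          simp only [riffle]
          rw [stride2_cons]
          simp only [List.drop_one, List.tail_cons]
          congr 1
          exact ih o' (by simp at h1 ⊢; omega) (by simp at h2 ⊢; omega)

theorem riffle_stride2 (xs : List Int) : riffle (stride2 xs) (stride2 (xs.drop 1)) = xs := by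
  induction xs using stride2.induct with
  | case1 => simp [stride2, riffle]
  | case2 x => simp [stride2, riffle]
  | case3 x y t ih =>
      simp only [stride2, List.drop_one, List.tail_cons]
      rw [stride2_cons, riffle, riffle, ih]

theorem stride2_sublist (xs : List Int) : (stride2 xs).Sublist xs := by
  induction xs using stride2.induct with
  | case1 => simp [stride2]
  | case2 x => simp [stride2]
  | case3 x y t ih =>
      simp only [stride2]
      exact (ih.cons y).cons₂ x

-- the even/odd index comprehensions of A are strides of the length-n prefix of arr
theorem extract_stride (arr : List Int) (n : Int) (a : Nat) (hn : n ≤ (arr.length : Int)) :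
    ((PySem.List.pyRange (a : Int) n 2).map (fun i => PySem.List.pyGetD arr i 0)) =
      stride2 ((arr.take n.toNat).drop a) := by
  rw [PySem.List.pyRange_of_pos _ _ (by norm_num : (0:Int) < 2)]
  apply List.ext_getElem?
  intro i
  have hm : (if (a : Int) < n then ((n - ↑a + 2 - 1) / 2).toNat else 0) = (n.toNat - a + 1) / 2 := by
    split_ifs with h <;> omega
  rw [hm, List.map_map, List.getElem?_map, stride2_getElem?]
  by_cases hi : i < (n.toNat - a + 1) / 2
  · rw [List.getElem?_range hi]
    simp only [Option.map_some, Function.comp_apply]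
    have hcast : ((a : Int) + 2 * (i : Int)) = ((a + 2 * i : Nat) : Int) := by push_cast; ring
    rw [hcast, PySem.List.pyGetD_natCast]
    have h1 : a + 2 * i < n.toNat := by omega
    have h2 : a + 2 * i < arr.length := by omega
    rw [List.getElem?_drop]
    simp [List.getD_eq_getElem?_getD, h1, List.getElem?_eq_getElem h2]
  · rw [show ((List.range ((n.toNat - a + 1) / 2)))[i]? = none from
        List.getElem?_eq_none (by simp; omega)]
    rw [show (List.drop a (List.take n.toNat arr))[2 * i]? = none from
        List.getElem?_eq_none (by simp [List.length_drop, List.length_take]; omega)]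
    simp

-- B's counting-dict loop is collections.Counter
theorem pvCounts_eq_counter (xs : List Int) : pvCounts xs = PySem.Dict.counter xs :=
  PySem.Dict.foldl_insert_getD_add_one_eq_counter xs

-- Python == on two counting dicts is multiset equality of the counted lists
theorem pvDictEq_counter (xs ys : List Int) :
    pvDictEq (PySem.Dict.counter xs) (PySem.Dict.counter ys) = true ↔ xs.Perm ys := by
  rw [List.perm_iff_count]
  unfold pvDictEq
  simp only [Bool.and_eq_true, List.all_eq_true, beq_iff_eq]
  constructor
  · rintro ⟨h1, h2⟩ k
    by_cases hk : k ∈ xs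
    · have hmem : (k, (xs.count k : Int)) ∈ (PySem.Dict.counter xs).items := by
        rw [PySem.Dict.items_counter]
        exact List.mem_map.mpr ⟨k, (PySem.Set.mem_ofList _ _).mpr hk, rfl⟩
      have := h1 _ hmem
      have hgd : (PySem.Dict.counter ys).getD k 0 = (xs.count k : Int) := by
        rw [PySem.Dict.getD_eq_get?_getD, this]; rfl
      rw [PySem.Dict.getD_counter] at hgd
      exact_mod_cast hgd.symm
    · by_cases hk' : k ∈ ys
      · exfalso
        have hmem : (k, (ys.count k : Int)) ∈ (PySem.Dict.counter ys).items := by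
          rw [PySem.Dict.items_counter]
          exact List.mem_map.mpr ⟨k, (PySem.Set.mem_ofList _ _).mpr hk', rfl⟩
        have := h2 _ hmem
        have hc : (PySem.Dict.counter xs).contains k = true := by
          rw [PySem.Dict.contains_eq_isSome_get?, this]; rfl
        rw [PySem.Dict.contains_counter] at hc
        simp at hc
        exact hk hc
      · rw [List.count_eq_zero_of_not_mem hk, List.count_eq_zero_of_not_mem hk']
  · intro h
    constructor
    · intro p hp
      rw [PySem.Dict.items_counter] at hp
      obtain ⟨k, hk, rfl⟩ := List.mem_map.mp hp
      have hkx : k ∈ xs := (PySem.Set.mem_ofList _ _).mp hk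
      have hky : k ∈ ys := by
        rw [← List.count_pos_iff] at hkx ⊢
        rw [← h k]; exact hkx
      have hmem : (k, (ys.count k : Int)) ∈ (PySem.Dict.counter ys).items := by
        rw [PySem.Dict.items_counter]
        exact List.mem_map.mpr ⟨k, (PySem.Set.mem_ofList _ _).mpr hky, rfl⟩
      have := PySem.Dict.get?_of_mem_items _ hmem (PySem.Dict.nodup_keys_counter ys)
      rw [this, h k]
    · intro p hp
      rw [PySem.Dict.items_counter] at hp
      obtain ⟨k, hk, rfl⟩ := List.mem_map.mp hp
      have hky : k ∈ ys := (PySem.Set.mem_ofList _ _).mp hk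
      have hkx : k ∈ xs := by
        rw [← List.count_pos_iff] at hky ⊢
        rw [h k]; exact hky
      have hmem : (k, (xs.count k : Int)) ∈ (PySem.Dict.counter xs).items := by
        rw [PySem.Dict.items_counter]
        exact List.mem_map.mpr ⟨k, (PySem.Set.mem_ofList _ _).mpr hkx, rfl⟩
      have := PySem.Dict.get?_of_mem_items _ hmem (PySem.Dict.nodup_keys_counter xs)
      rw [this, h k]

-- if both dict comparisons succeed the two slices have the lengths of the strides of s
theorem bothFalse (t' s : List Int) (h : t'.length < s.length) :
    (pvDictEq (PySem.Dict.counter (stride2 t')) (PySem.Dict.counter (stride2 s)) &&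
     pvDictEq (PySem.Dict.counter (stride2 (t'.drop 1))) (PySem.Dict.counter (stride2 (s.drop 1)))) = false := by
  by_contra hc
  rw [Bool.not_eq_false, Bool.and_eq_true] at hc
  obtain ⟨h1, h2⟩ := hc
  have p1 := (pvDictEq_counter _ _).mp h1
  have p2 := (pvDictEq_counter _ _).mp h2
  have l1 := p1.length_eq
  have l2 := p2.length_eq
  rw [stride2_length, stride2_length] at l1 l2
  simp only [List.length_drop] at l2
  omega

-- ===== VERDICT (by name: the statement is the Claim_ definition above) =====
theorem can_sort_spec : Claim_equal_can_sort := by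
  intro n arr hdom hpre
  unfold Pre_can_sort at hpre
  unfold Spec_can_sort
  have boolext : ∀ (a b : Bool), (a = true ↔ b = true) → a = b := by decide
  have hE := extract_stride arr n 0 hpre
  have hO := extract_stride arr n 1 hpre
  simp only [Nat.cast_zero, Nat.cast_one, List.drop_zero] at hE hO
  have hTlen : (arr.take n.toNat).length = n.toNat := by
    rw [List.length_take]; omega
  set s := PySem.List.sorted arr (fun x => x) false with hs
  have hslen : s.length = arr.length := by rw [hs, PySem.List.length_sorted]
  set ES := PySem.List.sorted ((PySem.List.pyRange 0 n 2).map (fun i => PySem.List.pyGetD arr i 0)) (fun x => x) false with hES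
  set OS := PySem.List.sorted ((PySem.List.pyRange 1 n 2).map (fun i => PySem.List.pyGetD arr i 0)) (fun x => x) false with hOS
  have hESlen : ES.length = (n.toNat + 1) / 2 := by
    rw [hES, PySem.List.length_sorted, hE, stride2_length, hTlen]
  have hOSlen : OS.length = n.toNat / 2 := by
    rw [hOS, PySem.List.length_sorted, hO, stride2_length, List.length_drop, hTlen]
    omega
  have hXlen : (stride2 ((List.replicate n.toNat (0:Int)).drop 1)).length = n.toNat / 2 := by
    rw [stride2_length, List.length_drop, List.length_replicate]
    omega
  have hA : can_sort n arr = decide (riffle ES OS = s) := by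
    simp only [can_sort]
    rw [← hES, ← hOS, ← hs,
      stride2_riffle ES _ (by rw [hXlen, hESlen]; omega) (by rw [hXlen, hESlen]; omega)]
  have hMlen : (riffle ES OS).length = n.toNat := by
    rw [riffle_length, hESlen, hOSlen]; omega
  have hB : can_sort_alt n arr =
      (pvDictEq (PySem.Dict.counter (stride2 (arr.take (if n < 0 then (arr.length : Int) + n else n).toNat)))
                (PySem.Dict.counter (stride2 s)) &&
       pvDictEq (PySem.Dict.counter (stride2 ((arr.take (if n < 0 then (arr.length : Int) + n else n).toNat).drop 1)))
                (PySem.Dict.counter (stride2 (s.drop 1)))) := by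
    simp only [can_sort_alt, pvCounts_eq_counter, ← hs]
  by_cases hn0 : 0 ≤ n
  · have hstop : (if n < 0 then (arr.length : Int) + n else n).toNat = n.toNat := by
      rw [if_neg (by omega)]
    rw [hstop] at hB
    by_cases hfull : n = (arr.length : Int)
    · -- n == len(arr): the real equivalence
      have htake : arr.take n.toNat = arr := by
        have : n.toNat = arr.length := by omega
        rw [this, List.take_length]
      rw [htake] at hE hO
      rw [hA, hB, htake]
      apply boolext
      rw [Bool.and_eq_true, pvDictEq_counter, pvDictEq_counter, decide_eq_true_iff]
      have hlen1 : arr.length = n.toNat := by omega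
      constructor
      · intro h
        have hs2 : stride2 s = ES :=
          h ▸ stride2_riffle ES OS (by omega) (by omega)
        have hperm1 : (stride2 arr).Perm (stride2 s) := by
          rw [hs2, hES, ← hE]
          exact (PySem.List.sorted_perm _ _ _).symm
        refine ⟨hperm1, ?_⟩
        rcases hES' : ES with _ | ⟨x, xs⟩
        · have hOS0 : OS = [] := by
            apply List.eq_nil_of_length_eq_zero
            rw [hOSlen]
            have := hESlen; rw [hES'] at this; simp at this; omega
          have hsnil : s = [] := by
            rw [← h, hES', hOS0]; simp [riffle]
          have hl0 : arr.length = 0 := by rw [← hslen, hsnil]; rfl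
          have harr0 := List.eq_nil_of_length_eq_zero hl0
          rw [harr0, hsnil]
        · have hdrop : s.drop 1 = riffle OS xs := by
            rw [← h, hES']; simp [riffle]
          have hxslen : xs.length = (n.toNat + 1) / 2 - 1 := by
            have := hESlen; rw [hES'] at this; simp at this; omega
          have hn1 : 1 ≤ n.toNat := by
            have := hESlen; rw [hES'] at this; simp at this; omega
          have hs2' : stride2 (s.drop 1) = OS := by
            rw [hdrop]
            exact stride2_riffle OS xs (by omega) (by omega)
          rw [hs2', hOS, ← hO]
          exact (PySem.List.sorted_perm _ _ _).symm
      · rintro ⟨h1, h2⟩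
        have pw1 : (stride2 s).Pairwise (· ≤ ·) :=
          List.Pairwise.sublist (stride2_sublist s) (PySem.List.sorted_pairwise arr (fun x => x))
        have pw2 : (stride2 (s.drop 1)).Pairwise (· ≤ ·) :=
          List.Pairwise.sublist ((stride2_sublist (s.drop 1)).trans (List.drop_sublist 1 s))
            (PySem.List.sorted_pairwise arr (fun x => x))
        have e1 : ES = stride2 s := by
          rw [hES, hE]
          exact PySem.List.sorted_id_eq_of_perm_of_pairwise _ _ (h1.symm) pw1
        have e2 : OS = stride2 (s.drop 1) := by
          rw [hOS, hO]
          exact PySem.List.sorted_id_eq_of_perm_of_pairwise _ _ (h2.symm) pw2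
        rw [e1, e2, riffle_stride2]
    · -- 0 ≤ n < len(arr): both sides are False (length / multiset-size mismatch)
      have hlt : n.toNat < arr.length := by omega
      rw [hA, hB]
      have hBf := bothFalse (arr.take n.toNat) s (by rw [hTlen, hslen]; omega)
      rw [hBf]
      apply decide_eq_false
      intro heq
      have := congrArg List.length heq
      rw [hMlen, hslen] at this
      omega
  · -- n < 0: A's ranges are empty; B's slices are proper prefixes (or arr = [])
    have hESnil : ES = [] := by
      apply List.eq_nil_of_length_eq_zero
      rw [hESlen]; omega
    have hOSnil : OS = [] := by
      apply List.eq_nil_of_length_eq_zero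
      rw [hOSlen]; omega
    have hAe : can_sort n arr = decide (([] : List Int) = s) := by
      rw [hA, hESnil, hOSnil]; simp [riffle]
    by_cases harr : arr = []
    · -- arr = []: both sides are True
      have hsnil : s = [] := by
        apply List.eq_nil_of_length_eq_zero
        rw [hslen, harr]; rfl
      rw [hAe, hB, hsnil, harr]
      simp only [List.take_nil, List.drop_nil]
      decide
    · -- arr ≠ []: both sides are False
      have hlen1 : 1 ≤ arr.length := by
        cases arr with
        | nil => exact absurd rfl harr
        | cons a t => simp
      rw [hAe, hB]
      have hBf := bothFalse (arr.take (if n < 0 then (arr.length : Int) + n else n).toNat) s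
        (by
          rw [List.length_take, hslen]
          have : (if n < 0 then (arr.length : Int) + n else n).toNat ≤ arr.length - 1 := by
            rw [if_pos (by omega)]; omega
          omega)
      rw [hBf]
      apply decide_eq_false
      intro heq
      have := congrArg List.length heq
      rw [hslen] at this
      simp at this
      omega
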